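-- pv_equiv track=rewrite | github.com/EnTangledUpInBlue/qShop | codes/rotated_surface_code_coordinates.py | rsurf_check_coords
-- ===== SOURCE A (Python) =====
-- from typing import List,Set,Dict,Tuple
--
-- def rsurf_check_coords(L1:int,L2:int) -> Tuple[Set[Tuple[int,int]]]:
--     r"""
--     Coordinates for the check locations in the rotated surface code.
--
--     :param L1: The horizontal dimension of the rectangular lattice for the rotated surface code.
--     :param L2: The vertical dimension of the rectangular lattice for the rotated surface code.
--
--     :return: A list with two sets of coordinates. The first element consists of the
--     coordinates of the xchecks with the second element consisting of those for the
--     zchecks.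
--     """
--
--     xcheck_coords = set()
--     zcheck_coords = set()
--
--     for ii in range(-1,L1):
--         xcoord = 2*ii + 1
--         for jj in range(-1,L2):
--             ycoord = 2*jj+1
--
--             if (ii+jj)%2 and (jj>-1 and jj<L2-1):
--                 xcheck_coords.add((xcoord,ycoord))
--
--             elif (not (ii+jj)%2) and (ii>-1 and ii<L1-1):
--                 zcheck_coords.add((xcoord,ycoord))
--
--     return (xcheck_coords,zcheck_coords)
-- ===== SOURCE B (Python) =====
-- from typing import List,Set,Dict,Tuple
--
-- def rsurf_check_coords(L1:int,L2:int) -> Tuple[Set[Tuple[int,int]]]: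
--     """Emit the check coordinates directly by stride-4 arithmetic (start offset
--     chosen per column parity), with no parity test or filtering of the grid."""
--     xcheck_coords = set()
--     zcheck_coords = set()
--     for ii in range(-1, L1):
--         x = 2*ii + 1
--         for y in range(1 if ii % 2 else 3, 2*L2 - 2, 4):
--             xcheck_coords.add((x, y))
--     for ii in range(0, L1 - 1):
--         x = 2*ii + 1
--         for y in range(-1 if ii % 2 else 1, 2*L2, 4):
--             zcheck_coords.add((x, y))
--     return (xcheck_coords, zcheck_coords)
-- ===== Notes on version B (the rewrite author's own statement) =====
-- stated objective: alternative
-- what changed: Instead of scanning the full (L1+1)x(L2+1) grid and parity-filtering each cell with if/elif, B generates the admissible y-coordinates of each column directly with a stride-4 range whose start offset is fixed by the column parity, so no parity test or boundary filter is ever evaluated and only the emitted points are visited.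
import Mathlib
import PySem

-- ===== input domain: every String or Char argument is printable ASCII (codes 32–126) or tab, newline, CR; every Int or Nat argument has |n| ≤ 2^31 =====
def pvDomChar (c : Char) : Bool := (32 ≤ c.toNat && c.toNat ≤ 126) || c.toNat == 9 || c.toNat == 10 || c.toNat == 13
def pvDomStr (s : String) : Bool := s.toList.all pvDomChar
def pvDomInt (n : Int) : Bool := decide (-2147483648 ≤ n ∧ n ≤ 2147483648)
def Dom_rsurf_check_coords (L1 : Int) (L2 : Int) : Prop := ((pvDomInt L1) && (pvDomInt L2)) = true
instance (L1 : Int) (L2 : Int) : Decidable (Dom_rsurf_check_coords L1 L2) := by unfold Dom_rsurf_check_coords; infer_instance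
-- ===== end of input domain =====

-- B emits the check coordinates directly by stride-4 arithmetic over the y-axis
-- (start offset chosen by column parity), with no parity test or filtering of the
-- full grid (alternative: touches only the emitted points instead of every cell).

-- ===== PORT A =====
-- One double loop over ii ∈ range(-1,L1), jj ∈ range(-1,L2), adding to one of the two
-- sets depending on the parity of ii+jj and the boundary tests, exactly as A does.
def rsurf_check_coords (L1 : Int) (L2 : Int) : (List (Int × Int)) × (List (Int × Int)) :=
  (PySem.List.pyRange (-1) L1 1).foldl
    (fun (st : PySem.Set (Int × Int) × PySem.Set (Int × Int)) ii =>
      let xcoord := 2 * ii + 1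
      (PySem.List.pyRange (-1) L2 1).foldl
        (fun st jj =>
          let ycoord := 2 * jj + 1
          if PySem.Int.mod (ii + jj) 2 != 0 && (decide (jj > -1) && decide (jj < L2 - 1)) then
            (PySem.Set.add st.1 (xcoord, ycoord), st.2)
          else if !(PySem.Int.mod (ii + jj) 2 != 0) && (decide (ii > -1) && decide (ii < L1 - 1)) then
            (st.1, PySem.Set.add st.2 (xcoord, ycoord))
          else st) st)
    (PySem.Set.empty, PySem.Set.empty)

-- ===== PORT B =====
-- Two passes; for each column the admissible y-coordinates are generated directly
-- with range(start, bound, 4), the start offset fixed by the parity of ii.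
def rsurf_check_coords_alt (L1 : Int) (L2 : Int) : (List (Int × Int)) × (List (Int × Int)) :=
  let xcheck_coords :=
    (PySem.List.pyRange (-1) L1 1).foldl
      (fun s ii =>
        let x := 2 * ii + 1
        (PySem.List.pyRange (if PySem.Int.mod ii 2 != 0 then 1 else 3) (2 * L2 - 2) 4).foldl
          (fun s y => PySem.Set.add s (x, y)) s)
      PySem.Set.empty
  let zcheck_coords :=
    (PySem.List.pyRange 0 (L1 - 1) 1).foldl
      (fun s ii =>
        let x := 2 * ii + 1
        (PySem.List.pyRange (if PySem.Int.mod ii 2 != 0 then -1 else 1) (2 * L2) 4).foldl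
          (fun s y => PySem.Set.add s (x, y)) s)
      PySem.Set.empty
  (xcheck_coords, zcheck_coords)

-- ===== PRECONDITION & SPEC =====
def Spec_rsurf_check_coords (L1 : Int) (L2 : Int) (out : (List (Int × Int)) × (List (Int × Int))) : Prop := out = rsurf_check_coords_alt L1 L2
instance (L1 : Int) (L2 : Int) (out : (List (Int × Int)) × (List (Int × Int))) : Decidable (Spec_rsurf_check_coords L1 L2 out) := by unfold Spec_rsurf_check_coords; infer_instance

-- ===== CLAIM (what is proved, stated in full; the proofs are below) =====
def Claim_equal_rsurf_check_coords : Prop := ∀ (L1 : Int) (L2 : Int), Dom_rsurf_check_coords L1 L2 → Spec_rsurf_check_coords L1 L2 (rsurf_check_coords L1 L2)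

-- ===== LEMMAS AND PROOFS =====

-- Python '%' on 2 is Lean's emod on 2.
theorem pv_mod2 (x : Int) : PySem.Int.mod x 2 = x % 2 := by
  simp [PySem.Int.mod, Int.fmod_eq_emod]

-- range(a,b,4): empty / cons unfoldings.
theorem pv_nil4 (a b : Int) (h : b ≤ a) : PySem.List.pyRange a b 4 = [] := by
  rw [PySem.List.pyRange_of_pos a b (by norm_num)]
  rw [if_neg (by omega)]
  simp

theorem pv_cons4 (a b : Int) (h : a < b) :
    PySem.List.pyRange a b 4 = a :: PySem.List.pyRange (a + 4) b 4 := by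
  rw [PySem.List.pyRange_of_pos a b (by norm_num),
      PySem.List.pyRange_of_pos (a + 4) b (by norm_num)]
  rw [if_pos h]
  by_cases h4 : a + 4 < b
  · rw [if_pos h4]
    have hn : ((b - a + 4 - 1) / 4).toNat = ((b - (a + 4) + 4 - 1) / 4).toNat + 1 := by
      omega
    rw [hn, List.range_succ_eq_map]
    simp only [List.map_cons, List.map_map, Nat.cast_zero, mul_zero, add_zero]
    congr 1
    apply List.map_congr_left
    intro k _
    simp only [Function.comp_apply]
    push_cast
    ring
  · rw [if_neg h4]
    have hn : ((b - a + 4 - 1) / 4).toNat = 1 := by omega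
    rw [hn]
    simp

-- The parity-filtered row, scaled to y-coordinates, is exactly a stride-4 range whose
-- start is fixed by the parity of c + a.
theorem pv_stride (c : Int) : ∀ (n : Nat) (a b : Int), b - a ≤ (n : Int) →
    ((PySem.List.pyRange a b 1).filter (fun j => PySem.Int.mod (c + j) 2 != 0)).map
        (fun j => 2 * j + 1)
      = PySem.List.pyRange
          (2 * (if PySem.Int.mod (c + a) 2 != 0 then a else a + 1) + 1) (2 * b) 4 := by
  intro n
  induction n with
  | zero =>
    intro a b h
    rw [PySem.List.pyRange_one_eq_nil (by omega)]
    rw [pv_nil4]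
    · simp
    · split_ifs <;> omega
  | succ n ih =>
    intro a b h
    by_cases hab : a < b
    · rw [PySem.List.pyRange_one_cons hab, List.filter_cons]
      by_cases hp : (c + a) % 2 = 0
      · have hc : (PySem.Int.mod (c + a) 2 != 0) = false := by
          rw [pv_mod2, hp]; rfl
        have hc' : (PySem.Int.mod (c + (a + 1)) 2 != 0) = true := by
          rw [pv_mod2]
          simp only [bne_iff_ne, ne_eq]
          omega
        rw [hc]
        simp only [Bool.false_eq_true, if_false]
        rw [ih (a + 1) b (by omega), hc']
        simp
      · have hc : (PySem.Int.mod (c + a) 2 != 0) = true := by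
          rw [pv_mod2]
          simp only [bne_iff_ne, ne_eq]
          omega
        have hc' : (PySem.Int.mod (c + (a + 1)) 2 != 0) = false := by
          rw [pv_mod2]
          simp only [bne_eq_false_iff_eq]
          omega
        rw [hc]
        simp only [if_true]
        rw [List.map_cons, ih (a + 1) b (by omega), hc']
        simp only [Bool.false_eq_true, if_false]
        rw [pv_cons4 (2 * a + 1) (2 * b) (by omega)]
        have he : (2 * a + 1 + 4 : Int) = 2 * (a + 1 + 1) + 1 := by ring
        rw [he]
    · rw [PySem.List.pyRange_one_eq_nil (by omega)]
      rw [pv_nil4]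
      · simp
      · split_ifs <;> omega

-- The x-filter of A over the full jj-range [-1,L2) with its boundary test equals the
-- plain parity filter over the interior range [0,L2-1).
theorem pv_xfilter (L2 ii : Int) :
    (PySem.List.pyRange (-1) L2 1).filter
      (fun jj => PySem.Int.mod (ii + jj) 2 != 0 && (decide (jj > -1) && decide (jj < L2 - 1)))
    = (PySem.List.pyRange 0 (L2 - 1) 1).filter
      (fun jj => PySem.Int.mod (ii + jj) 2 != 0) := by
  by_cases h2 : 1 ≤ L2
  · have e1 : PySem.List.pyRange (-1) L2 1
        = PySem.List.pyRange (-1) 0 1 ++ PySem.List.pyRange 0 L2 1 :=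
      PySem.List.pyRange_one_append (-1) 0 L2 (by omega) (by omega)
    have e2 : PySem.List.pyRange 0 L2 1
        = PySem.List.pyRange 0 (L2 - 1) 1 ++ PySem.List.pyRange (L2 - 1) L2 1 :=
      PySem.List.pyRange_one_append 0 (L2 - 1) L2 (by omega) (by omega)
    have e3 : PySem.List.pyRange (-1) 0 1 = [-1] := by
      have := PySem.List.pyRange_one_singleton (-1); simpa using this
    have e4 : PySem.List.pyRange (L2 - 1) L2 1 = [L2 - 1] := by
      have := PySem.List.pyRange_one_singleton (L2 - 1)
      have h : L2 - 1 + 1 = L2 := by omega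
      rwa [h] at this
    have emid : (PySem.List.pyRange 0 (L2 - 1) 1).filter
        (fun jj => PySem.Int.mod (ii + jj) 2 != 0 && (decide (jj > -1) && decide (jj < L2 - 1)))
        = (PySem.List.pyRange 0 (L2 - 1) 1).filter
          (fun jj => PySem.Int.mod (ii + jj) 2 != 0) := by
      apply List.filter_congr
      intro jj hj
      rw [PySem.List.mem_pyRange_one] at hj
      rw [decide_eq_true (show jj > -1 by omega), decide_eq_true hj.2]
      simp
    rw [e1, e2, e3, e4, List.filter_append, List.filter_append, emid]
    rw [show (List.filter
        (fun jj => PySem.Int.mod (ii + jj) 2 != 0 && (decide (jj > -1) && decide (jj < L2 - 1)))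
        [-1] : List Int) = [] by simp]
    rw [show (List.filter
        (fun jj => PySem.Int.mod (ii + jj) 2 != 0 && (decide (jj > -1) && decide (jj < L2 - 1)))
        [L2 - 1] : List Int) = [] by simp]
    simp
  · have eR : PySem.List.pyRange 0 (L2 - 1) 1 = [] :=
      PySem.List.pyRange_one_eq_nil (by omega)
    by_cases h0 : L2 = 0
    · subst h0
      have e3 : PySem.List.pyRange (-1) 0 1 = [-1] := by
        have := PySem.List.pyRange_one_singleton (-1); simpa using this
      rw [eR, e3]; simp
    · have eL : PySem.List.pyRange (-1) L2 1 = [] :=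
        PySem.List.pyRange_one_eq_nil (by omega)
      rw [eL, eR]; rfl

-- A's z-filter for an interior row ii reduces to the plain parity filter.
theorem pv_zfilter_in (L1 L2 ii : Int) (h0 : 0 ≤ ii) (h1 : ii < L1 - 1) :
    (PySem.List.pyRange (-1) L2 1).filter
      (fun jj => !(PySem.Int.mod (ii + jj) 2 != 0) && (decide (ii > -1) && decide (ii < L1 - 1)))
    = (PySem.List.pyRange (-1) L2 1).filter
      (fun jj => !(PySem.Int.mod (ii + jj) 2 != 0)) := by
  apply List.filter_congr
  intro jj _
  rw [decide_eq_true (show ii > -1 by omega), decide_eq_true h1]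
  simp

-- A's z-filter for a boundary row ii is empty.
theorem pv_zfilter_out (L1 L2 ii : Int) (h : ¬ (0 ≤ ii ∧ ii < L1 - 1)) :
    (PySem.List.pyRange (-1) L2 1).filter
      (fun jj => !(PySem.Int.mod (ii + jj) 2 != 0) && (decide (ii > -1) && decide (ii < L1 - 1)))
    = [] := by
  apply List.filter_eq_nil_iff.mpr
  intro jj _
  by_cases h0 : 0 ≤ ii
  · rw [decide_eq_false (show ¬ ii < L1 - 1 by omega)]; simp
  · rw [decide_eq_false (show ¬ ii > -1 by omega)]; simp

-- A's interleaved double loop splits into two independent component folds.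
theorem pv_A_split (L1 L2 : Int) :
    rsurf_check_coords L1 L2 =
      ((PySem.List.pyRange (-1) L1 1).foldl
        (fun xs ii => (PySem.List.pyRange (-1) L2 1).foldl
          (fun xs jj =>
            if PySem.Int.mod (ii + jj) 2 != 0 && (decide (jj > -1) && decide (jj < L2 - 1)) then
              PySem.Set.add xs (2 * ii + 1, 2 * jj + 1)
            else xs) xs) PySem.Set.empty,
       (PySem.List.pyRange (-1) L1 1).foldl
        (fun zs ii => (PySem.List.pyRange (-1) L2 1).foldl
          (fun zs jj =>
            if !(PySem.Int.mod (ii + jj) 2 != 0) && (decide (ii > -1) && decide (ii < L1 - 1)) then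
              PySem.Set.add zs (2 * ii + 1, 2 * jj + 1)
            else zs) zs) PySem.Set.empty) := by
  unfold rsurf_check_coords
  have hinner : ∀ (ii : Int) (st : PySem.Set (Int × Int) × PySem.Set (Int × Int)),
      (PySem.List.pyRange (-1) L2 1).foldl
        (fun st jj =>
          let ycoord := 2 * jj + 1
          if PySem.Int.mod (ii + jj) 2 != 0 && (decide (jj > -1) && decide (jj < L2 - 1)) then
            (PySem.Set.add st.1 (2 * ii + 1, ycoord), st.2)
          else if !(PySem.Int.mod (ii + jj) 2 != 0) && (decide (ii > -1) && decide (ii < L1 - 1)) then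
            (st.1, PySem.Set.add st.2 (2 * ii + 1, ycoord))
          else st) st
      = ((PySem.List.pyRange (-1) L2 1).foldl
          (fun xs jj =>
            if PySem.Int.mod (ii + jj) 2 != 0 && (decide (jj > -1) && decide (jj < L2 - 1)) then
              PySem.Set.add xs (2 * ii + 1, 2 * jj + 1)
            else xs) st.1,
         (PySem.List.pyRange (-1) L2 1).foldl
          (fun zs jj =>
            if !(PySem.Int.mod (ii + jj) 2 != 0) && (decide (ii > -1) && decide (ii < L1 - 1)) then
              PySem.Set.add zs (2 * ii + 1, 2 * jj + 1)
            else zs) st.2) := by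
    intro ii st
    have hfun : (fun (st : PySem.Set (Int × Int) × PySem.Set (Int × Int)) jj =>
          let ycoord := 2 * jj + 1
          if PySem.Int.mod (ii + jj) 2 != 0 && (decide (jj > -1) && decide (jj < L2 - 1)) then
            (PySem.Set.add st.1 (2 * ii + 1, ycoord), st.2)
          else if !(PySem.Int.mod (ii + jj) 2 != 0) && (decide (ii > -1) && decide (ii < L1 - 1)) then
            (st.1, PySem.Set.add st.2 (2 * ii + 1, ycoord))
          else st)
        = (fun st jj =>
          ((fun xs jj =>
            if PySem.Int.mod (ii + jj) 2 != 0 && (decide (jj > -1) && decide (jj < L2 - 1)) then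
              PySem.Set.add xs (2 * ii + 1, 2 * jj + 1)
            else xs) st.1 jj,
           (fun zs jj =>
            if !(PySem.Int.mod (ii + jj) 2 != 0) && (decide (ii > -1) && decide (ii < L1 - 1)) then
              PySem.Set.add zs (2 * ii + 1, 2 * jj + 1)
            else zs) st.2 jj)) := by
      funext st jj
      cases hc1 : (PySem.Int.mod (ii + jj) 2 != 0 && (decide (jj > -1) && decide (jj < L2 - 1))) with
      | true =>
        have hc2 : (!(PySem.Int.mod (ii + jj) 2 != 0)
            && (decide (ii > -1) && decide (ii < L1 - 1))) = false := by
          simp only [Bool.and_eq_true] at hc1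
          rw [hc1.1]; rfl
        simp only [hc1, hc2]; simp
      | false =>
        cases hc2 : (!(PySem.Int.mod (ii + jj) 2 != 0)
            && (decide (ii > -1) && decide (ii < L1 - 1))) with
        | true => simp only [hc1, hc2]; simp
        | false => simp only [hc1, hc2]; simp
    rw [hfun]
    exact PySem.List.foldl_prod_mk
      (f := fun xs jj =>
        if PySem.Int.mod (ii + jj) 2 != 0 && (decide (jj > -1) && decide (jj < L2 - 1)) then
          PySem.Set.add xs (2 * ii + 1, 2 * jj + 1)
        else xs)
      (g := fun zs jj =>
        if !(PySem.Int.mod (ii + jj) 2 != 0) && (decide (ii > -1) && decide (ii < L1 - 1)) then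
          PySem.Set.add zs (2 * ii + 1, 2 * jj + 1)
        else zs)
      (PySem.List.pyRange (-1) L2 1) st.1 st.2
  have houter : (fun (st : PySem.Set (Int × Int) × PySem.Set (Int × Int)) ii =>
        (PySem.List.pyRange (-1) L2 1).foldl
          (fun st jj =>
            let ycoord := 2 * jj + 1
            if PySem.Int.mod (ii + jj) 2 != 0 && (decide (jj > -1) && decide (jj < L2 - 1)) then
              (PySem.Set.add st.1 (2 * ii + 1, ycoord), st.2)
            else if !(PySem.Int.mod (ii + jj) 2 != 0) && (decide (ii > -1) && decide (ii < L1 - 1)) then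
              (st.1, PySem.Set.add st.2 (2 * ii + 1, ycoord))
            else st) st)
      = (fun st ii =>
        ((fun xs ii => (PySem.List.pyRange (-1) L2 1).foldl
          (fun xs jj =>
            if PySem.Int.mod (ii + jj) 2 != 0 && (decide (jj > -1) && decide (jj < L2 - 1)) then
              PySem.Set.add xs (2 * ii + 1, 2 * jj + 1)
            else xs) xs) st.1 ii,
         (fun zs ii => (PySem.List.pyRange (-1) L2 1).foldl
          (fun zs jj =>
            if !(PySem.Int.mod (ii + jj) 2 != 0) && (decide (ii > -1) && decide (ii < L1 - 1)) then
              PySem.Set.add zs (2 * ii + 1, 2 * jj + 1)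
            else zs) zs) st.2 ii)) := by
    funext st ii; exact hinner ii st
  rw [houter]
  exact PySem.List.foldl_prod_mk
    (f := fun xs ii => (PySem.List.pyRange (-1) L2 1).foldl
      (fun xs jj =>
        if PySem.Int.mod (ii + jj) 2 != 0 && (decide (jj > -1) && decide (jj < L2 - 1)) then
          PySem.Set.add xs (2 * ii + 1, 2 * jj + 1)
        else xs) xs)
    (g := fun zs ii => (PySem.List.pyRange (-1) L2 1).foldl
      (fun zs jj =>
        if !(PySem.Int.mod (ii + jj) 2 != 0) && (decide (ii > -1) && decide (ii < L1 - 1)) then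
          PySem.Set.add zs (2 * ii + 1, 2 * jj + 1)
        else zs) zs)
    (PySem.List.pyRange (-1) L1 1) PySem.Set.empty PySem.Set.empty

-- The z-outer loop of A over all rows [-1,L1) equals the loop over interior rows
-- [0,L1-1): boundary rows contribute nothing, interior rows lose the boundary test.
theorem pv_zouter (L1 L2 : Int) (z0 : PySem.Set (Int × Int)) :
    (PySem.List.pyRange (-1) L1 1).foldl
      (fun zs ii => ((PySem.List.pyRange (-1) L2 1).filter
          (fun jj => !(PySem.Int.mod (ii + jj) 2 != 0)
            && (decide (ii > -1) && decide (ii < L1 - 1)))).foldl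
        (fun zs jj => PySem.Set.add zs (2 * ii + 1, 2 * jj + 1)) zs) z0
    = (PySem.List.pyRange 0 (L1 - 1) 1).foldl
      (fun zs ii => ((PySem.List.pyRange (-1) L2 1).filter
          (fun jj => !(PySem.Int.mod (ii + jj) 2 != 0))).foldl
        (fun zs jj => PySem.Set.add zs (2 * ii + 1, 2 * jj + 1)) zs) z0 := by
  by_cases h1 : 1 ≤ L1
  · have e1 : PySem.List.pyRange (-1) L1 1
        = PySem.List.pyRange (-1) 0 1 ++ PySem.List.pyRange 0 L1 1 :=
      PySem.List.pyRange_one_append (-1) 0 L1 (by omega) (by omega)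
    have e2 : PySem.List.pyRange 0 L1 1
        = PySem.List.pyRange 0 (L1 - 1) 1 ++ PySem.List.pyRange (L1 - 1) L1 1 :=
      PySem.List.pyRange_one_append 0 (L1 - 1) L1 (by omega) (by omega)
    have e3 : PySem.List.pyRange (-1) 0 1 = [-1] := by
      have := PySem.List.pyRange_one_singleton (-1); simpa using this
    have e4 : PySem.List.pyRange (L1 - 1) L1 1 = [L1 - 1] := by
      have := PySem.List.pyRange_one_singleton (L1 - 1)
      have h : L1 - 1 + 1 = L1 := by omega
      rwa [h] at this
    rw [e1, e2, e3, e4, List.foldl_append, List.foldl_append]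
    simp only [List.foldl_cons, List.foldl_nil]
    rw [pv_zfilter_out L1 L2 (-1) (by omega), pv_zfilter_out L1 L2 (L1 - 1) (by omega)]
    simp only [List.foldl_nil]
    apply PySem.List.foldl_congr_mem
    intro zs ii hii
    rw [PySem.List.mem_pyRange_one] at hii
    rw [pv_zfilter_in L1 L2 ii hii.1 hii.2]
  · by_cases h0 : L1 = 0
    · subst h0
      have e3 : PySem.List.pyRange (-1) 0 1 = [-1] := by
        have := PySem.List.pyRange_one_singleton (-1); simpa using this
      have eR : PySem.List.pyRange 0 (0 - 1) 1 = [] :=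
        PySem.List.pyRange_one_eq_nil (by omega)
      rw [e3, eR]
      simp only [List.foldl_cons, List.foldl_nil]
      rw [pv_zfilter_out 0 L2 (-1) (by omega)]
      rfl
    · have eL : PySem.List.pyRange (-1) L1 1 = [] :=
        PySem.List.pyRange_one_eq_nil (by omega)
      have eR : PySem.List.pyRange 0 (L1 - 1) 1 = [] :=
        PySem.List.pyRange_one_eq_nil (by omega)
      rw [eL, eR]
      rfl

-- A's filtered x-row, folded as pairs, equals B's stride-4 fold for the same ii.
theorem pv_xrow (L2 ii : Int) (s : PySem.Set (Int × Int)) :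
    ((PySem.List.pyRange 0 (L2 - 1) 1).filter
        (fun jj => PySem.Int.mod (ii + jj) 2 != 0)).foldl
      (fun xs jj => PySem.Set.add xs (2 * ii + 1, 2 * jj + 1)) s
    = (PySem.List.pyRange (if PySem.Int.mod ii 2 != 0 then 1 else 3) (2 * L2 - 2) 4).foldl
      (fun xs y => PySem.Set.add xs (2 * ii + 1, y)) s := by
  have hG := pv_stride ii (L2 - 1 - 0).toNat 0 (L2 - 1) (by omega)
  have hstart : (2 * (if PySem.Int.mod (ii + 0) 2 != 0 then 0 else 0 + 1) + 1 : Int)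
      = (if PySem.Int.mod ii 2 != 0 then 1 else 3) := by
    rw [show ii + (0:Int) = ii by ring]
    split_ifs <;> norm_num
  have hb : (2 * (L2 - 1) : Int) = 2 * L2 - 2 := by ring
  rw [hstart, hb] at hG
  rw [← hG, List.foldl_map]

-- A's filtered z-row, folded as pairs, equals B's stride-4 fold for the same ii.
theorem pv_zrow (L2 ii : Int) (s : PySem.Set (Int × Int)) :
    ((PySem.List.pyRange (-1) L2 1).filter
        (fun jj => !(PySem.Int.mod (ii + jj) 2 != 0))).foldl
      (fun zs jj => PySem.Set.add zs (2 * ii + 1, 2 * jj + 1)) s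
    = (PySem.List.pyRange (if PySem.Int.mod ii 2 != 0 then -1 else 1) (2 * L2) 4).foldl
      (fun zs y => PySem.Set.add zs (2 * ii + 1, y)) s := by
  have hpred : (PySem.List.pyRange (-1) L2 1).filter
      (fun jj => !(PySem.Int.mod (ii + jj) 2 != 0))
      = (PySem.List.pyRange (-1) L2 1).filter
      (fun jj => PySem.Int.mod ((ii + 1) + jj) 2 != 0) := by
    apply List.filter_congr
    intro jj _
    rw [pv_mod2, pv_mod2]
    rcases Int.emod_two_eq_zero_or_one (ii + jj) with h | h
    · rw [h, show (ii + 1 + jj) % 2 = 1 by omega]; rfl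
    · rw [h, show (ii + 1 + jj) % 2 = 0 by omega]; rfl
  have hG := pv_stride (ii + 1) (L2 - (-1)).toNat (-1) L2 (by omega)
  have hstart : (2 * (if PySem.Int.mod (ii + 1 + -1) 2 != 0 then (-1 : Int) else -1 + 1) + 1)
      = (if PySem.Int.mod ii 2 != 0 then (-1 : Int) else 1) := by
    rw [show ii + 1 + (-1 : Int) = ii by ring]
    split_ifs <;> norm_num
  rw [hstart] at hG
  rw [hpred, ← hG, List.foldl_map]

-- ===== VERDICT (by name: the statement is the Claim_ definition above) =====
theorem rsurf_check_coords_spec : Claim_equal_rsurf_check_coords := by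
  intro L1 L2 _
  show rsurf_check_coords L1 L2 = rsurf_check_coords_alt L1 L2
  rw [pv_A_split]
  unfold rsurf_check_coords_alt
  apply Prod.ext
  · -- x-check component
    show _ = (PySem.List.pyRange (-1) L1 1).foldl _ PySem.Set.empty
    apply PySem.List.foldl_congr_mem
    intro xs ii _
    rw [PySem.List.foldl_if_eq_foldl_filter
        (fun jj => PySem.Int.mod (ii + jj) 2 != 0 && (decide (jj > -1) && decide (jj < L2 - 1)))
        (fun xs jj => PySem.Set.add xs (2 * ii + 1, 2 * jj + 1)),
      pv_xfilter L2 ii, pv_xrow L2 ii]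
  · -- z-check component
    show _ = (PySem.List.pyRange 0 (L1 - 1) 1).foldl _ PySem.Set.empty
    have hstep : (fun (zs : PySem.Set (Int × Int)) ii => (PySem.List.pyRange (-1) L2 1).foldl
          (fun zs jj =>
            if !(PySem.Int.mod (ii + jj) 2 != 0) && (decide (ii > -1) && decide (ii < L1 - 1)) then
              PySem.Set.add zs (2 * ii + 1, 2 * jj + 1)
            else zs) zs)
        = (fun zs ii => ((PySem.List.pyRange (-1) L2 1).filter
            (fun jj => !(PySem.Int.mod (ii + jj) 2 != 0)
              && (decide (ii > -1) && decide (ii < L1 - 1)))).foldl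
          (fun zs jj => PySem.Set.add zs (2 * ii + 1, 2 * jj + 1)) zs) := by
      funext zs ii
      exact PySem.List.foldl_if_eq_foldl_filter _ _ _ _
    rw [hstep, pv_zouter L1 L2 PySem.Set.empty]
    apply PySem.List.foldl_congr_mem
    intro zs ii _
    rw [pv_zrow L2 ii]
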